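-- pv_equiv track=rewrite | github.com/RudranshKaran/GitInsights | backend/app/services/evaluation_service.py | _evaluate_configuration
-- ===== SOURCE A (Python) =====
-- from typing import Any
--
-- CONFIG_FILES = {
--     "gitignore": {".gitignore"},
--     "license": {"license", "license.md", "license.txt", "copying", "copying.md"},
--     "dependency": {
--         "requirements.txt", "pyproject.toml", "setup.py", "setup.cfg",
--         "package.json", "package-lock.json", "yarn.lock", "pnpm-lock.yaml",
--         "go.mod", "cargo.toml", "gemfile", "build.gradle", "pom.xml",
--         "composer.json", "mix.exs", "project.clj"
--     },
--     "readme": {"readme", "readme.md", "readme.txt", "readme.rst"}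
-- }
--
-- def _evaluate_configuration(files: list[dict[str, Any]]) -> tuple[int, list[str]]:
--     """
--     Check for common configuration and metadata files.
--
--     Files to Detect:
--     - .gitignore
--     - LICENSE
--     - requirements.txt, pyproject.toml, package.json, etc.
--     - README
--
--     Scoring Rules (0-10):
--     - .gitignore present → +3
--     - License present → +3
--     - Dependency file present → +4
--
--     Args:
--         files: List of file entries from repository
--
--     Returns:
--         Tuple of (score, list of issues)
--     """
--     issues: list[str] = []
--     score = 0
--
--     # Build set of lowercase file names for matching
--     file_names = set()
--     for file_entry in files:
--         name = file_entry.get("name", "").lower()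
--         file_names.add(name)
--
--     # Check for .gitignore
--     has_gitignore = bool(file_names.intersection(CONFIG_FILES["gitignore"]))
--     if has_gitignore:
--         score += 3
--     else:
--         issues.append("No .gitignore file found")
--
--     # Check for license
--     has_license = bool(file_names.intersection(CONFIG_FILES["license"]))
--     if has_license:
--         score += 3
--     else:
--         issues.append("No LICENSE file found")
--
--     # Check for dependency file
--     has_dependency = bool(file_names.intersection(CONFIG_FILES["dependency"]))
--     if has_dependency:
--         score += 4
--     else:
--         issues.append("No dependency file found (e.g., requirements.txt, package.json)")
--
--     return (score, issues)
-- ===== SOURCE B (Python) =====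
-- # B: inverted lookup table (filename -> category) + one classifying pass, then a scoring table.
-- _LOOKUP = {
--     ".gitignore": "gitignore",
--     "license": "license", "license.md": "license", "license.txt": "license",
--     "copying": "license", "copying.md": "license",
--     "requirements.txt": "dependency", "pyproject.toml": "dependency",
--     "setup.py": "dependency", "setup.cfg": "dependency",
--     "package.json": "dependency", "package-lock.json": "dependency",
--     "yarn.lock": "dependency", "pnpm-lock.yaml": "dependency",
--     "go.mod": "dependency", "cargo.toml": "dependency",
--     "gemfile": "dependency", "build.gradle": "dependency",
--     "pom.xml": "dependency", "composer.json": "dependency",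
--     "mix.exs": "dependency", "project.clj": "dependency",
-- }
--
-- _SCORING = [
--     ("gitignore", 3, "No .gitignore file found"),
--     ("license", 3, "No LICENSE file found"),
--     ("dependency", 4, "No dependency file found (e.g., requirements.txt, package.json)"),
-- ]
--
-- def _evaluate_configuration(files):
--     found = set()
--     for file_entry in files:
--         category = _LOOKUP.get(file_entry.get("name", "").lower())
--         if category is not None:
--             found.add(category)
--     score = 0
--     issues = []
--     for category, points, message in _SCORING:
--         if category in found:
--             score += points
--         else:
--             issues.append(message)
--     return (score, issues)
-- ===== Notes on version B (the rewrite author's own statement) =====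
-- stated objective: alternative
-- what changed: Replaced building a set of all filenames followed by three set-intersections against fixed category sets with an inverted filename-to-category dict consulted in a single classifying pass that accumulates found categories, plus a data-driven scoring table loop.
import Mathlib
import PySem

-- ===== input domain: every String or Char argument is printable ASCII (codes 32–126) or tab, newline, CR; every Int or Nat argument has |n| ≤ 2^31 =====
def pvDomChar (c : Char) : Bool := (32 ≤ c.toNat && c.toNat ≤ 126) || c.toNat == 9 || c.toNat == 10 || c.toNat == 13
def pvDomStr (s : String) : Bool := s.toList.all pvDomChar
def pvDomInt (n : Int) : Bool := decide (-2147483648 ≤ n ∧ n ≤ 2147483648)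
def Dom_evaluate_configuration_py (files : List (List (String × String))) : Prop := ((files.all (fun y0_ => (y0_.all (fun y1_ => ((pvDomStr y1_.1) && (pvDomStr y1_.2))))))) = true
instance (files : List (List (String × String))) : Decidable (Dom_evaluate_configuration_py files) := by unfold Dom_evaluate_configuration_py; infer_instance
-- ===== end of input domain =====

-- B replaces A's "collect all names, intersect with three fixed sets" by an inverted
-- name→category lookup consulted in one classifying pass plus a scoring-table loop (alternative decomposition).

-- ===== PORT A =====
-- CONFIG_FILES["gitignore"], ["license"], ["dependency"] (the "readme" entry is never used by A)
def pvGitignoreSet : PySem.Set String := PySem.Set.ofList [".gitignore"]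
def pvLicenseSet : PySem.Set String :=
  PySem.Set.ofList ["license", "license.md", "license.txt", "copying", "copying.md"]
def pvDependencySet : PySem.Set String :=
  PySem.Set.ofList ["requirements.txt", "pyproject.toml", "setup.py", "setup.cfg",
    "package.json", "package-lock.json", "yarn.lock", "pnpm-lock.yaml",
    "go.mod", "cargo.toml", "gemfile", "build.gradle", "pom.xml",
    "composer.json", "mix.exs", "project.clj"]

def evaluate_configuration_py (files : List (List (String × String))) : Int × List String :=
  let issues : List String := []
  let score : Int := 0
  -- file_names = set(); for file_entry in files: file_names.add(file_entry.get("name","").lower())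
  let file_names : PySem.Set String := files.foldl
    (fun s file_entry =>
      PySem.Set.add s (PySem.Str.lower (PySem.Dict.getD (PySem.Dict.mk file_entry) "name" "")))
    PySem.Set.empty
  let has_gitignore : Bool := !(PySem.Set.inter file_names pvGitignoreSet).isEmpty
  let (score, issues) :=
    if has_gitignore then (score + 3, issues) else (score, issues ++ ["No .gitignore file found"])
  let has_license : Bool := !(PySem.Set.inter file_names pvLicenseSet).isEmpty
  let (score, issues) :=
    if has_license then (score + 3, issues) else (score, issues ++ ["No LICENSE file found"])
  let has_dependency : Bool := !(PySem.Set.inter file_names pvDependencySet).isEmpty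
  let (score, issues) :=
    if has_dependency then (score + 4, issues)
    else (score, issues ++ ["No dependency file found (e.g., requirements.txt, package.json)"])
  (score, issues)

-- ===== PORT B =====
def pvLookup : PySem.Dict String String := PySem.Dict.mk
  [(".gitignore", "gitignore"),
   ("license", "license"), ("license.md", "license"), ("license.txt", "license"),
   ("copying", "license"), ("copying.md", "license"),
   ("requirements.txt", "dependency"), ("pyproject.toml", "dependency"),
   ("setup.py", "dependency"), ("setup.cfg", "dependency"),
   ("package.json", "dependency"), ("package-lock.json", "dependency"),
   ("yarn.lock", "dependency"), ("pnpm-lock.yaml", "dependency"),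
   ("go.mod", "dependency"), ("cargo.toml", "dependency"),
   ("gemfile", "dependency"), ("build.gradle", "dependency"),
   ("pom.xml", "dependency"), ("composer.json", "dependency"),
   ("mix.exs", "dependency"), ("project.clj", "dependency")]

def pvScoring : List (String × Int × String) :=
  [("gitignore", 3, "No .gitignore file found"),
   ("license", 3, "No LICENSE file found"),
   ("dependency", 4, "No dependency file found (e.g., requirements.txt, package.json)")]

def evaluate_configuration_py_alt (files : List (List (String × String))) : Int × List String :=
  -- found = set(); for file_entry in files: category = _LOOKUP.get(...); if category is not None: found.add(category)
  let found : PySem.Set String := files.foldl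
    (fun f file_entry =>
      match PySem.Dict.get? pvLookup
          (PySem.Str.lower (PySem.Dict.getD (PySem.Dict.mk file_entry) "name" "")) with
      | some category => PySem.Set.add f category
      | none => f)
    PySem.Set.empty
  -- for category, points, message in _SCORING: …
  let (score, issues) := pvScoring.foldl
    (fun (acc : Int × List String) t =>
      if PySem.Set.contains found t.1 then (acc.1 + t.2.1, acc.2) else (acc.1, acc.2 ++ [t.2.2]))
    ((0 : Int), ([] : List String))
  (score, issues)

-- ===== PRECONDITION & SPEC =====
def Spec_evaluate_configuration_py (files : List (List (String × String))) (out : Int × List String) : Prop := out = evaluate_configuration_py_alt files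
instance (files : List (List (String × String))) (out : Int × List String) : Decidable (Spec_evaluate_configuration_py files out) := by unfold Spec_evaluate_configuration_py; infer_instance

-- ===== CLAIM (what is proved, stated in full; the proofs are below) =====
def Claim_equal_evaluate_configuration_py : Prop := ∀ (files : List (List (String × String))), Dom_evaluate_configuration_py files → Spec_evaluate_configuration_py files (evaluate_configuration_py files)

-- ===== LEMMAS AND PROOFS =====

-- the lowercased name of one file entry
def pvName (e : List (String × String)) : String :=
  PySem.Str.lower (PySem.Dict.getD (PySem.Dict.mk e) "name" "")

lemma pvName_def (e : List (String × String)) :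
    PySem.Str.lower (PySem.Dict.getD (PySem.Dict.mk e) "name" "") = pvName e := rfl

lemma pvLookup_keys_nodup : (PySem.Dict.keys pvLookup).Nodup := by decide

lemma pvLookup_git (n : String) :
    PySem.Dict.get? pvLookup n = some "gitignore" ↔ n ∈ pvGitignoreSet := by
  rw [PySem.Dict.get?_eq_some_iff_mem_items _ _ _ pvLookup_keys_nodup]
  simp [pvLookup, pvGitignoreSet, Prod.mk.injEq, PySem.Set.mem_ofList]

lemma pvLookup_lic (n : String) :
    PySem.Dict.get? pvLookup n = some "license" ↔ n ∈ pvLicenseSet := by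
  rw [PySem.Dict.get?_eq_some_iff_mem_items _ _ _ pvLookup_keys_nodup]
  simp [pvLookup, pvLicenseSet, Prod.mk.injEq, PySem.Set.mem_ofList]

lemma pvLookup_dep (n : String) :
    PySem.Dict.get? pvLookup n = some "dependency" ↔ n ∈ pvDependencySet := by
  rw [PySem.Dict.get?_eq_some_iff_mem_items _ _ _ pvLookup_keys_nodup]
  simp [pvLookup, pvDependencySet, Prod.mk.injEq, PySem.Set.mem_ofList]

lemma pvInter_nonempty (files : List (List (String × String))) (S : PySem.Set String) :
    (!(PySem.Set.inter
        (files.foldl (fun s e => PySem.Set.add s (pvName e)) PySem.Set.empty) S).isEmpty)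
      = decide (∃ e ∈ files, pvName e ∈ S) := by
  have key : (PySem.Set.inter
      (files.foldl (fun s e => PySem.Set.add s (pvName e)) PySem.Set.empty) S).isEmpty = false
      ↔ ∃ e ∈ files, pvName e ∈ S := by
    rw [List.isEmpty_eq_false_iff_exists_mem]
    constructor
    · rintro ⟨y, hy⟩
      rw [PySem.Set.mem_inter] at hy
      rcases (PySem.Set.mem_foldl_add files pvName PySem.Set.empty y).1 hy.1 with h | ⟨e, he, rfl⟩
      · simp [PySem.Set.empty] at h
      · exact ⟨e, he, hy.2⟩
    · rintro ⟨e, he, hS⟩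
      exact ⟨pvName e, (PySem.Set.mem_inter _ _ _).2
        ⟨(PySem.Set.mem_foldl_add files pvName PySem.Set.empty _).2 (Or.inr ⟨e, he, rfl⟩), hS⟩⟩
  cases h : (PySem.Set.inter
      (files.foldl (fun s e => PySem.Set.add s (pvName e)) PySem.Set.empty) S).isEmpty with
  | false => simp [key.1 h]
  | true =>
    have : ¬ ∃ e ∈ files, pvName e ∈ S := fun hp => by rw [key.2 hp] at h; cases h
    simp [this]

lemma pvFound_mem (files : List (List (String × String))) (s : PySem.Set String) (c : String) :
    c ∈ files.foldl
        (fun f e => match PySem.Dict.get? pvLookup (pvName e) with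
                    | some category => PySem.Set.add f category
                    | none => f) s
      ↔ c ∈ s ∨ ∃ e ∈ files, PySem.Dict.get? pvLookup (pvName e) = some c := by
  induction files generalizing s with
  | nil => simp
  | cons e t ih =>
    rw [List.foldl_cons]
    cases h : PySem.Dict.get? pvLookup (pvName e) with
    | none =>
      dsimp only
      rw [ih]
      simp only [List.mem_cons]
      constructor
      · rintro (h1 | ⟨e', he', hP⟩)
        · exact Or.inl h1
        · exact Or.inr ⟨e', Or.inr he', hP⟩
      · rintro (h1 | ⟨e', he', hP⟩)
        · exact Or.inl h1
        · rcases he' with rfl | he'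
          · rw [h] at hP; cases hP
          · exact Or.inr ⟨e', he', hP⟩
    | some v =>
      dsimp only
      rw [ih]
      simp only [PySem.Set.mem_add, List.mem_cons]
      constructor
      · rintro ((h1 | rfl) | ⟨e', he', hP⟩)
        · exact Or.inl h1
        · exact Or.inr ⟨e, Or.inl rfl, h⟩
        · exact Or.inr ⟨e', Or.inr he', hP⟩
      · rintro (h1 | ⟨e', he', hP⟩)
        · exact Or.inl (Or.inl h1)
        · rcases he' with rfl | he'
          · rw [h] at hP; exact Or.inl (Or.inr (Option.some.inj hP).symm)
          · exact Or.inr ⟨e', he', hP⟩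

-- B's found-set membership test equals A's intersection-nonempty test, for a category
-- whose lookup fibre is exactly the category's filename set.
lemma pvBool_eq (files : List (List (String × String))) (c : String) (S : PySem.Set String)
    (hspec : ∀ n, PySem.Dict.get? pvLookup n = some c ↔ n ∈ S) :
    PySem.Set.contains
      (files.foldl
        (fun f e => match PySem.Dict.get? pvLookup (pvName e) with
                    | some category => PySem.Set.add f category
                    | none => f) PySem.Set.empty) c
    = (!(PySem.Set.inter
        (files.foldl (fun s e => PySem.Set.add s (pvName e)) PySem.Set.empty) S).isEmpty) := by
  rw [pvInter_nonempty]
  cases h : PySem.Set.contains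
      (files.foldl
        (fun f e => match PySem.Dict.get? pvLookup (pvName e) with
                    | some category => PySem.Set.add f category
                    | none => f) PySem.Set.empty) c with
  | true =>
    have hmem := (PySem.Set.contains_iff _ _).1 h
    rcases (pvFound_mem files PySem.Set.empty c).1 hmem with h0 | ⟨e, he, hl⟩
    · simp [PySem.Set.empty] at h0
    · exact (decide_eq_true ⟨e, he, (hspec _).1 hl⟩).symm
  | false =>
    symm
    rw [decide_eq_false_iff_not]
    rintro ⟨e, he, hS⟩
    have : c ∈ files.foldl
        (fun f e => match PySem.Dict.get? pvLookup (pvName e) with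
                    | some category => PySem.Set.add f category
                    | none => f) PySem.Set.empty :=
      (pvFound_mem files PySem.Set.empty c).2 (Or.inr ⟨e, he, (hspec _).2 hS⟩)
    rw [← PySem.Set.contains_iff] at this
    rw [h] at this
    cases this

-- ===== VERDICT (by name: the statement is the Claim_ definition above) =====
theorem evaluate_configuration_py_spec : Claim_equal_evaluate_configuration_py := by
  intro files _
  unfold Spec_evaluate_configuration_py evaluate_configuration_py evaluate_configuration_py_alt
  simp only [pvName_def, pvScoring, List.foldl_cons, List.foldl_nil]
  rw [pvBool_eq files "gitignore" pvGitignoreSet pvLookup_git,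
      pvBool_eq files "license" pvLicenseSet pvLookup_lic,
      pvBool_eq files "dependency" pvDependencySet pvLookup_dep]
  split_ifs <;> rfl
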